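-- pv_equiv track=rewrite | github.com/serban-hartular/sentence-completion-server | ro_form_gen/lexicon.py | xpos_tag_matches
-- ===== SOURCE A (Python) =====
-- def xpos_tag_matches(xpos : str, other : str) -> int:
--     match_count = 0
--     for c1, c2 in zip(xpos, other):
--         if c1 == c2 and c1 != '-':
--             match_count += 1
--         elif c1 == '-' or c2 == '-':
--             match_count += 0
--         else:
--             return 0
--     return match_count
-- ===== SOURCE B (Python) =====
-- def xpos_tag_matches(xpos: str, other: str) -> int:
--     pairs = list(zip(xpos, other))
--     if any(c1 != c2 and c1 != '-' and c2 != '-' for c1, c2 in pairs):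
--         return 0
--     return sum(1 for c1, c2 in pairs if c1 == c2 and c1 != '-')
-- ===== Notes on version B (the rewrite author's own statement) =====
-- stated objective: simpler
-- what changed: Replaces A's single fused loop with an early return and running accumulator by two separate passes over the zipped pairs: a validation scan (any hard mismatch yields 0) followed by a pure counting scan.
import Mathlib
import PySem

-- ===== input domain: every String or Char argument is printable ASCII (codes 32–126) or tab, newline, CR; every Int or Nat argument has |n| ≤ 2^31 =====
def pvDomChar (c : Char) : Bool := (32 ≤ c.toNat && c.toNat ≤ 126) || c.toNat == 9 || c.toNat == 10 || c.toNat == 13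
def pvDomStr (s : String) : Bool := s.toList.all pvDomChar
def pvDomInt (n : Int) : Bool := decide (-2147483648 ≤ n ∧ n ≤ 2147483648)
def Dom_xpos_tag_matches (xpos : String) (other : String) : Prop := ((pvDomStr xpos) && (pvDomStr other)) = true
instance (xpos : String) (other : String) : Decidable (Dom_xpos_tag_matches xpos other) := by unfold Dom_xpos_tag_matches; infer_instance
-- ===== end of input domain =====

-- B replaces A's fused loop-with-early-return by two separate scans (validate, then count); objective: simpler.

-- ===== PORT A =====
-- A's loop over zip(xpos, other) with accumulator match_count and early return 0.
def xposLoopA : List (Char × Char) → Int → Int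
  | [], acc => acc
  | (c1, c2) :: t, acc =>
    if c1 = c2 ∧ c1 ≠ '-' then xposLoopA t (acc + 1)
    else if c1 = '-' ∨ c2 = '-' then xposLoopA t (acc + 0)
    else 0

def xpos_tag_matches (xpos : String) (other : String) : Int :=
  xposLoopA (xpos.toList.zip other.toList) 0

-- ===== PORT B =====
def xpos_tag_matches_alt (xpos : String) (other : String) : Int :=
  let pairs := xpos.toList.zip other.toList
  if pairs.any (fun p => p.1 ≠ p.2 && p.1 ≠ '-' && p.2 ≠ '-') then 0
  else ((pairs.filter (fun p => p.1 = p.2 && p.1 ≠ '-')).length : Int)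

-- ===== PRECONDITION & SPEC =====
def Spec_xpos_tag_matches (xpos : String) (other : String) (out : Int) : Prop := out = xpos_tag_matches_alt xpos other
instance (xpos : String) (other : String) (out : Int) : Decidable (Spec_xpos_tag_matches xpos other out) := by unfold Spec_xpos_tag_matches; infer_instance

-- ===== CLAIM (what is proved, stated in full; the proofs are below) =====
def Claim_equal_xpos_tag_matches : Prop := ∀ (xpos : String) (other : String), Dom_xpos_tag_matches xpos other → Spec_xpos_tag_matches xpos other (xpos_tag_matches xpos other)

-- ===== LEMMAS AND PROOFS =====
theorem xposLoopA_eq (l : List (Char × Char)) : ∀ acc : Int,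
    xposLoopA l acc =
      if l.any (fun p => p.1 ≠ p.2 && p.1 ≠ '-' && p.2 ≠ '-') then 0
      else acc + ((l.filter (fun p => p.1 = p.2 && p.1 ≠ '-')).length : Int) := by
  induction l with
  | nil => intro acc; simp [xposLoopA]
  | cons hd t ih =>
    intro acc
    obtain ⟨c1, c2⟩ := hd
    by_cases h1 : c1 = c2 ∧ c1 ≠ '-'
    · simp only [xposLoopA, if_pos h1, ih]
      obtain ⟨he, hdash⟩ := h1
      subst he
      simp [hdash, List.any_cons, List.filter_cons]
      split <;> push_cast <;> ring
    · by_cases h2 : c1 = '-' ∨ c2 = '-'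
      · simp only [xposLoopA, if_neg h1, if_pos h2, ih]
        have hne : ¬ (c1 = c2 ∧ c1 ≠ '-') := h1
        rcases h2 with h | h <;>
          simp_all [List.any_cons, List.filter_cons] <;> split <;> simp_all
      · simp only [xposLoopA, if_neg h1, if_neg h2]
        push_neg at h2
        have hc : ¬ c1 = c2 := fun he => h1 ⟨he, h2.1⟩
        simp [List.any_cons, hc, h2.1, h2.2]

-- ===== VERDICT (by name: the statement is the Claim_ definition above) =====
theorem xpos_tag_matches_spec : Claim_equal_xpos_tag_matches := by
  intro xpos other _
  unfold Spec_xpos_tag_matches xpos_tag_matches xpos_tag_matches_alt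
  rw [xposLoopA_eq]
  simp
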